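-- pv_equiv track=rewrite | github.com/AngelicaDiazB14/CLASESP. | clase 1 intro.py | sumarDigitosImpares_aux
-- ===== SOURCE A (Python) =====
-- def sumarDigitosImpares_aux(n):
--     if(n == 0):
--         return 0
--     else:
--         if((n%2) != 0):
--             return (n%10) + sumarDigitosImpares_aux(n // 10)  # n%10 obtengo el úñtimo dígito del número, n//10 quita el último dígito del número
--         else:
--             return sumarDigitosImpares_aux(n // 10)
-- ===== SOURCE B (Python) =====
-- def sumarDigitosImpares_aux(n):
--     # Iterative re-implementation: same digit arithmetic, explicit loop with accumulator.
--     total = 0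
--     while n != 0:
--         if n % 2 != 0:
--             total += n % 10
--         n //= 10
--     return total
-- ===== Notes on version B (the rewrite author's own statement) =====
-- stated objective: simpler
-- what changed: Replaces A's non-tail recursion with an iterative while-loop over the digits using a running accumulator.
import Mathlib
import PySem

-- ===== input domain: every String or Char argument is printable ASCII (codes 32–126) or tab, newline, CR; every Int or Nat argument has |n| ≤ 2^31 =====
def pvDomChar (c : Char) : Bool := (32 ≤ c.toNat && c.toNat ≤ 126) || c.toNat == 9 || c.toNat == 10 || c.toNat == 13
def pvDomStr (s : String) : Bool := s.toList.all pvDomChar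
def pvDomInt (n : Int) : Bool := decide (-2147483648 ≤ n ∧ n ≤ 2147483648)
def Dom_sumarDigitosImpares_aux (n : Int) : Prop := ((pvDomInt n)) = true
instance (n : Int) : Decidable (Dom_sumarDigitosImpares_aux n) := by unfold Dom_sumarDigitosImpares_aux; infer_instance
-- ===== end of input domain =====

-- B replaces A's non-tail recursion by an iterative accumulator loop (objective: simpler).
-- On negative n both Pythons run forever (n // 10 stays -1): excluded by Pre_.

-- ===== PORT A =====
-- Literal port of A's recursion; the `n < 0` branch is a totality guard only
-- (Python diverges there; such inputs are outside Pre_).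
def sumarDigitosImpares_aux (n : Int) : Int :=
  if n = 0 then 0
  else if n < 0 then 0
  else if PySem.Int.mod n 2 ≠ 0 then
    PySem.Int.mod n 10 + sumarDigitosImpares_aux (PySem.Int.floordiv n 10)
  else
    sumarDigitosImpares_aux (PySem.Int.floordiv n 10)
termination_by n.toNat
decreasing_by
  all_goals
    rw [PySem.Int.floordiv_eq_ediv_of_pos (by omega)]
    omega

-- ===== PORT B =====
-- B's while-loop as a tail recursion over (n, total); same totality guard.
def sumarDigitosImparesLoop (n total : Int) : Int :=
  if n = 0 then total
  else if n < 0 then total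
  else
    sumarDigitosImparesLoop (PySem.Int.floordiv n 10)
      (if PySem.Int.mod n 2 ≠ 0 then total + PySem.Int.mod n 10 else total)
termination_by n.toNat
decreasing_by
  rw [PySem.Int.floordiv_eq_ediv_of_pos (by omega)]
  omega

def sumarDigitosImpares_aux_alt (n : Int) : Int :=
  sumarDigitosImparesLoop n 0

-- ===== PRECONDITION & SPEC =====
-- Pre_ excludes negative n, on which the Python A recurses forever (RecursionError).
def Pre_sumarDigitosImpares_aux (n : Int) : Prop := 0 ≤ n
instance (n : Int) : Decidable (Pre_sumarDigitosImpares_aux n) := by unfold Pre_sumarDigitosImpares_aux; infer_instance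
def pvWitness_sumarDigitosImpares_aux : Int := 135

def Spec_sumarDigitosImpares_aux (n : Int) (out : Int) : Prop := out = sumarDigitosImpares_aux_alt n
instance (n : Int) (out : Int) : Decidable (Spec_sumarDigitosImpares_aux n out) := by unfold Spec_sumarDigitosImpares_aux; infer_instance

-- ===== CLAIM (what is proved, stated in full; the proofs are below) =====
def Claim_equal_sumarDigitosImpares_aux : Prop := ∀ (n : Int), Dom_sumarDigitosImpares_aux n → Pre_sumarDigitosImpares_aux n → Spec_sumarDigitosImpares_aux n (sumarDigitosImpares_aux n)

-- ===== LEMMAS AND PROOFS =====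
theorem loop_eq_aux (n total : Int) :
    sumarDigitosImparesLoop n total = total + sumarDigitosImpares_aux n := by
  induction n using sumarDigitosImpares_aux.induct generalizing total with
  | case1 => simp [sumarDigitosImparesLoop, sumarDigitosImpares_aux]
  | case2 n h1 h2 =>
      rw [sumarDigitosImparesLoop, sumarDigitosImpares_aux]
      simp [h1, h2]
  | case3 n h1 h2 h3 ih =>
      rw [sumarDigitosImparesLoop, sumarDigitosImpares_aux,
        if_neg h1, if_neg h1, if_neg h2, if_neg h2, if_pos h3, if_pos h3, ih]
      ring
  | case4 n h1 h2 h3 ih =>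
      rw [sumarDigitosImparesLoop, sumarDigitosImpares_aux,
        if_neg h1, if_neg h1, if_neg h2, if_neg h2, if_neg h3, if_neg h3, ih]

-- ===== VERDICT (by name: the statement is the Claim_ definition above) =====
theorem sumarDigitosImpares_aux_spec : Claim_equal_sumarDigitosImpares_aux := by
  intro n _ _
  unfold Spec_sumarDigitosImpares_aux sumarDigitosImpares_aux_alt
  rw [loop_eq_aux]
  ring
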